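-- pv_equiv track=rewrite | github.com/utilitarianexe/wiki_poverty_list_bot | world_bank_csv.py | parse_header
-- ===== SOURCE A (Python) =====
-- def parse_header(line):
--     '''
--     input-----------------
--     Series Name,Series Code,Country,Country Code,2012 [YR2012],2013 [YR2013],2014 [YR2014]
--     output -------------
--     ['2012','2013','2014']
--     '''
--     header_info = line.split(',')
--     years_included = []
--     for item in reversed(header_info):
--         if item == 'Country Code':
--             break
--         year = item[:4]
--         years_included.append(year)
--     return list(reversed(years_included)) #needs to be iterated more than once
-- ===== SOURCE B (Python) =====
-- def parse_header(line):
--     header_info = line.split(',')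
--     if 'Country Code' in header_info:
--         idx = len(header_info) - 1 - header_info[::-1].index('Country Code')
--         tail = header_info[idx + 1:]
--     else:
--         tail = header_info
--     return [item[:4] for item in tail]
-- ===== Notes on version B (the rewrite author's own statement) =====
-- stated objective: simpler
-- what changed: Replaces the reverse loop with break plus a final reversal by computing the index of the last occurrence of the sentinel column once and returning a single forward comprehension over the tail (the full list when the sentinel is absent).
import Mathlib
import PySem

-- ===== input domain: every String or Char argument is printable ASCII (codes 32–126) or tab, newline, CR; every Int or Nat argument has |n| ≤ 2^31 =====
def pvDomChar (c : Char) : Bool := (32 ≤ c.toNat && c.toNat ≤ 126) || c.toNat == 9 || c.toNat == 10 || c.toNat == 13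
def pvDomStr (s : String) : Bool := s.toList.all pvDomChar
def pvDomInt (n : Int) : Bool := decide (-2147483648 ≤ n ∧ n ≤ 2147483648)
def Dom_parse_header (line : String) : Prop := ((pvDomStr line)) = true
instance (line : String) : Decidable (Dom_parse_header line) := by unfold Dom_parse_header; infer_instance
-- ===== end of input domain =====

-- B replaces A's reverse-loop-with-break and final reversal by locating the last 'Country Code'
-- once and mapping one forward comprehension over the tail (objective: simpler).

-- ===== PORT A =====
-- the 'for item in reversed(header_info)' loop with its break, run over the reversed list
def phLoopA (acc : List String) : List String → List String
  | [] => acc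
  | item :: rest =>
    if item = "Country Code" then acc
    else phLoopA (acc ++ [PySem.Str.slice item none (some 4)]) rest

def parse_header (line : String) : List String :=
  let header_info := (PySem.Str.split? line ",").getD []   -- sep "," ≠ "" so split? is always some
  (phLoopA [] header_info.reverse).reverse

-- ===== PORT B =====
def parse_header_alt (line : String) : List String :=
  let header_info := (PySem.Str.split? line ",").getD []   -- sep "," ≠ "" so split? is always some
  let tail :=
    -- header_info[::-1] is the reverse (PySem.List.slice?_none_none_neg_one); .index with the
    -- preceding 'in' membership test is index? (none exactly when absent)
    match PySem.List.index? header_info.reverse "Country Code" with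
    | some i => PySem.List.slice header_info (some ((header_info.length : Int) - 1 - (i : Int) + 1)) none
    | none => header_info
  tail.map (fun item => PySem.Str.slice item none (some 4))

-- ===== PRECONDITION & SPEC =====
def Spec_parse_header (line : String) (out : List String) : Prop := out = parse_header_alt line
instance (line : String) (out : List String) : Decidable (Spec_parse_header line out) := by unfold Spec_parse_header; infer_instance

-- ===== CLAIM (what is proved, stated in full; the proofs are below) =====
def Claim_equal_parse_header : Prop := ∀ (line : String), Dom_parse_header line → Spec_parse_header line (parse_header line)

-- ===== LEMMAS AND PROOFS =====

-- A's loop collects item[:4] of the prefix before the first 'Country Code'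
theorem phLoopA_eq (l : List String) (acc : List String) :
    phLoopA acc l = acc ++ (l.takeWhile (fun x => x ≠ "Country Code")).map
      (fun item => PySem.Str.slice item none (some 4)) := by
  induction l generalizing acc with
  | nil => simp [phLoopA]
  | cons x xs ih =>
    by_cases h : x = "Country Code"
    · simp [phLoopA, h]
    · simp [phLoopA, h, ih]

theorem takeWhile_ne_of_index?_none {l : List String} {v : String}
    (h : PySem.List.index? l v = none) : l.takeWhile (fun x => x ≠ v) = l := by
  rw [PySem.List.index?_eq_none_iff] at h
  apply List.takeWhile_eq_self_iff.mpr
  intro x hx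
  simp
  exact fun he => h (he ▸ hx)

theorem takeWhile_ne_of_index?_some {l : List String} {v : String} {i : Nat}
    (h : PySem.List.index? l v = some i) : l.takeWhile (fun x => x ≠ v) = l.take i := by
  induction l generalizing i with
  | nil => simp [PySem.List.index?] at h
  | cons x xs ih =>
    by_cases hx : x = v
    · subst hx
      rw [PySem.List.index?_cons_self] at h
      cases h
      simp
    · rw [PySem.List.index?_cons_of_ne xs hx] at h
      cases hj : PySem.List.index? xs v with
      | none => rw [hj] at h; simp at h
      | some j =>
        rw [hj] at h
        simp at h
        subst h
        simp [hx]
        simpa using ih hj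

-- ===== VERDICT (by name: the statement is the Claim_ definition above) =====
theorem parse_header_spec : Claim_equal_parse_header := by
  intro line _
  unfold Spec_parse_header parse_header parse_header_alt
  set hdr := (PySem.Str.split? line ",").getD [] with hh
  simp only
  cases h : PySem.List.index? hdr.reverse "Country Code" with
  | none =>
    rw [phLoopA_eq, takeWhile_ne_of_index?_none h]
    simp [List.map_reverse]
  | some i =>
    obtain ⟨hi, -, -⟩ := PySem.List.getElem_of_index?_eq_some h
    rw [List.length_reverse] at hi
    rw [phLoopA_eq, takeWhile_ne_of_index?_some h]
    have harg : (hdr.length : Int) - 1 - (i : Int) + 1 = ((hdr.length - i : Nat) : Int) := by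
      push_cast [Nat.cast_sub hi.le]; ring
    rw [List.take_reverse]
    simp [harg, PySem.List.slice_from_natCast, List.map_reverse]
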